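-- pv_equiv track=rewrite | github.com/Kvijay199428/VSON | vson/serializers/timeseries.py | compress_repeated_values
-- ===== SOURCE A (Python) =====
-- from typing import Dict, Any, List, Optional  # ← ADD THIS LINE!
--
-- def compress_repeated_values(records: List[Dict], field: str) -> List[Dict]:
--     """
--     Compress repeated values in field
--
--     Args:
--         records: Time-series records
--         field: Field name to compress
--
--     Returns:
--         Records with run-length encoding for field
--     """
--     if not records:
--         return []
--
--     compressed = []
--     current_value = records[0].get(field)
--     count = 1
--
--     for i in range(1, len(records)):
--         value = records[i].get(field)
--
--         if value == current_value:
--             count += 1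
--         else:
--             compressed.append({
--                 **records[i-1],
--                 f'{field}_repeat_count': count,
--             })
--             current_value = value
--             count = 1
--
--     # Add last record
--     if records:
--         compressed.append({
--             **records[-1],
--             f'{field}_repeat_count': count,
--         })
--
--     return compressed
-- ===== SOURCE B (Python) =====
-- from typing import Dict, Any, List, Optional
--
--
-- def compress_repeated_values(records: List[Dict], field: str) -> List[Dict]:
--     """Boundary-index RLE: find run-end indices, counts are index differences."""
--     n = len(records)
--     keys = [r.get(field) for r in records]
--     ends = [i for i in range(n) if i == n - 1 or keys[i] != keys[i + 1]]
--     return [{**records[e], f'{field}_repeat_count': e - p}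
--             for p, e in zip([-1] + ends, ends)]
-- ===== Notes on version B (the rewrite author's own statement) =====
-- stated objective: alternative
-- what changed: Replaced A's single-pass counter loop (current_value/count state) by a staged boundary-index computation: precompute the key list, collect the indices where a run ends by comparing adjacent keys, then emit each run's last record with its count obtained as the difference of consecutive end indices via zip.
import Mathlib
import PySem

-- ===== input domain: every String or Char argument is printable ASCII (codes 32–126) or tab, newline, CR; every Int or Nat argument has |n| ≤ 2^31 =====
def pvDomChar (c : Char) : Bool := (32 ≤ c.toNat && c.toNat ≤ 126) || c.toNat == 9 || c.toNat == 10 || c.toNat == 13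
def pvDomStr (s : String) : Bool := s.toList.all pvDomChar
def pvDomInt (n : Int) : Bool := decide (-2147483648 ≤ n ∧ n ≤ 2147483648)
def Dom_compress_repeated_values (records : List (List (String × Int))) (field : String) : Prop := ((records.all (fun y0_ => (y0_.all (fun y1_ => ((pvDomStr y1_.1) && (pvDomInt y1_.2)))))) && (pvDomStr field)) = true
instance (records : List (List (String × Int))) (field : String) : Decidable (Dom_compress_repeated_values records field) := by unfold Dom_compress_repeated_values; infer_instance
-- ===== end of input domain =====

-- B replaces A's counter loop by a staged boundary-index computation: precompute the
-- key list, collect run-end indices by comparing adjacent keys, and obtain each count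
-- as the difference of consecutive end indices (alternative decomposition, same O(n)).

-- r.get(field)
def crvGet (r : List (String × Int)) (field : String) : Option Int :=
  (PySem.Dict.mk r).get? field

-- {**r, f'{field}_repeat_count': c}
def crvEmit (r : List (String × Int)) (field : String) (c : Int) : List (String × Int) :=
  ((PySem.Dict.mk r).insert (field ++ "_repeat_count") c).items

-- ===== PORT A =====
def compress_repeated_values (records : List (List (String × Int))) (field : String) : List (List (String × Int)) :=
  if records = [] then []
  else
    let st := (PySem.List.pyRange 1 records.length 1).foldl
      (fun (s : List (List (String × Int)) × Option Int × Int) i =>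
        let value := crvGet (PySem.List.pyGetD records i []) field
        if value == s.2.1 then (s.1, s.2.1, s.2.2 + 1)
        else (s.1 ++ [crvEmit (PySem.List.pyGetD records (i - 1) []) field s.2.2], value, 1))
      ([], crvGet (PySem.List.pyGetD records 0 []) field, 1)
    st.1 ++ [crvEmit (PySem.List.pyGetD records (-1) []) field st.2.2]

-- ===== PORT B =====
-- the comprehension filter's condition `i == n - 1 or keys[i] != keys[i + 1]`:
-- keys[i+1] is only reached when i ≠ n-1, so indexing never leaves the list; getD is exact there
def crvPred (field : String) (records : List (List (String × Int))) (i : Nat) : Bool :=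
  let keys := records.map (fun r => crvGet r field)
  decide (i = records.length - 1) || !(keys.getD i none == keys.getD (i + 1) none)

def compress_repeated_values_alt (records : List (List (String × Int))) (field : String) : List (List (String × Int)) :=
  let n := records.length
  let ends := (List.range n).filter (crvPred field records)
  (((-1 : Int) :: ends.map (fun (e : Nat) => (e : Int))).zip ends).map
    (fun pe => crvEmit (records.getD pe.2 []) field ((pe.2 : Int) - pe.1))

-- ===== PRECONDITION & SPEC =====
def Spec_compress_repeated_values (records : List (List (String × Int))) (field : String) (out : List (List (String × Int))) : Prop := out = compress_repeated_values_alt records field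
instance (records : List (List (String × Int))) (field : String) (out : List (List (String × Int))) : Decidable (Spec_compress_repeated_values records field out) := by unfold Spec_compress_repeated_values; infer_instance

-- ===== CLAIM (what is proved, stated in full; the proofs are below) =====
def Claim_equal_compress_repeated_values : Prop := ∀ (records : List (List (String × Int))) (field : String), Dom_compress_repeated_values records field → Spec_compress_repeated_values records field (compress_repeated_values records field)

-- ===== LEMMAS AND PROOFS =====

-- the common reference shape: the maximal runs of equal field value
def crvRuns (field : String) : List (List (String × Int)) → List (List (List (String × Int)))
  | [] => []
  | r :: rs =>
    let p := rs.span (fun y => crvGet y field == crvGet r field)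
    (r :: p.1) :: crvRuns field p.2
termination_by l => l.length
decreasing_by
  simp only [List.span_eq_takeWhile_dropWhile]
  have := List.length_dropWhile_le (fun y => crvGet y field == crvGet r field) rs
  simp; omega

def crvRunsMap (field : String) (L : List (List (List (String × Int)))) : List (List (String × Int)) :=
  L.map (fun g => crvEmit (g.getLastD []) field ((g.length : Int)))

-- ---------- A = runs ----------

-- A's loop, written structurally: prev is records[i-1], cv/cnt the counters
def crvLoop (field : String) (prev : List (String × Int)) (cv : Option Int) (cnt : Int) :
    List (List (String × Int)) → List (List (String × Int))
  | [] => [crvEmit prev field cnt]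
  | r :: rs =>
    if crvGet r field == cv then crvLoop field r cv (cnt + 1) rs
    else crvEmit prev field cnt :: crvLoop field r (crvGet r field) 1 rs

lemma crv_pyGetD_neg_one (L : List (List (String × Int))) (h : L ≠ []) :
    PySem.List.pyGetD L (-1) [] = L.getLastD [] := by
  have hl : 1 ≤ L.length := List.length_pos_of_ne_nil h
  simp [PySem.List.pyGetD, PySem.List.pyGet?, PySem.List.pyIdx?, hl,
    List.getLast?_eq_getElem?, List.getLastD_eq_getLast?,
    List.getElem?_eq_getElem (by omega : L.length - 1 < L.length)]

lemma crv_getLast_drop (L : List (List (String × Int))) (n : Nat) (h : (L.drop n) ≠ []) :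
    L.getLastD [] = (L.drop n).getLastD [] := by
  have hlt : n < L.length := by
    have := List.length_pos_of_ne_nil h; simp [List.length_drop] at this; omega
  rw [List.getLastD_eq_getLast?, List.getLastD_eq_getLast?,
    List.getLast?_eq_getElem?, List.getLast?_eq_getElem?, List.getElem?_drop, List.length_drop]
  congr 2; omega

-- Bridge: A's index fold over pyRange equals crvLoop on the remaining suffix
lemma crv_fold_eq_loop (field : String) (L : List (List (String × Int))) :
    ∀ (rest : List (List (String × Int))) (j : Nat) (prev : List (String × Int))
      (acc : List (List (String × Int))) (cv : Option Int) (cnt : Int),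
      1 ≤ j → L.drop (j - 1) = prev :: rest →
      (let st := (PySem.List.pyRange (j : Int) (L.length : Int) 1).foldl
        (fun (s : List (List (String × Int)) × Option Int × Int) i =>
          let value := crvGet (PySem.List.pyGetD L i []) field
          if value == s.2.1 then (s.1, s.2.1, s.2.2 + 1)
          else (s.1 ++ [crvEmit (PySem.List.pyGetD L (i - 1) []) field s.2.2], value, 1))
        (acc, cv, cnt)
       st.1 ++ [crvEmit (L.getLastD []) field st.2.2]) = acc ++ crvLoop field prev cv cnt rest := by
  intro rest
  induction rest with
  | nil =>
    intro j prev acc cv cnt hj hdrop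
    have hlen : L.length = j := by
      have h1 : (L.drop (j-1)).length = 1 := by rw [hdrop]; rfl
      rw [List.length_drop] at h1; omega
    have hrange : PySem.List.pyRange (j : Int) (L.length : Int) 1 = [] := by
      rw [hlen]; rw [PySem.List.pyRange_one]; simp
    rw [hrange]
    simp only [List.foldl_nil]
    have hlast : L.getLastD [] = prev := by
      rw [crv_getLast_drop L (j-1) (by rw [hdrop]; simp), hdrop]; rfl
    rw [hlast]; rfl
  | cons r rs ih =>
    intro j prev acc cv cnt hj hdrop
    have hdl : (L.drop (j-1)).length = rs.length + 2 := by rw [hdrop]; simp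
    rw [List.length_drop] at hdl
    have hjlt : j < L.length := by omega
    have hcons : PySem.List.pyRange (j : Int) (L.length : Int) 1
        = (j : Int) :: PySem.List.pyRange ((j : Int) + 1) (L.length : Int) 1 := by
      exact PySem.List.pyRange_one_cons (by exact_mod_cast hjlt)
    have hdropj : L.drop j = r :: rs := by
      have : L.drop j = (L.drop (j-1)).drop 1 := by
        rw [List.drop_drop]; congr 1; omega
      rw [this, hdrop]; rfl
    have hLj : PySem.List.pyGetD L (j : Int) [] = r := by
      rw [PySem.List.pyGetD_natCast]
      have : L[j]? = some r := by
        have := (List.getElem?_drop (xs := L) (i := j) (j := 0)).symm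
        rw [hdropj] at this; simpa using this
      simp [List.getD, this]
    have hLj1 : PySem.List.pyGetD L ((j : Int) - 1) [] = prev := by
      have hc : (j : Int) - 1 = ((j - 1 : Nat) : Int) := by omega
      rw [hc, PySem.List.pyGetD_natCast]
      have : L[j-1]? = some prev := by
        have := (List.getElem?_drop (xs := L) (i := j-1) (j := 0)).symm
        rw [hdrop] at this; simpa using this
      simp [List.getD, this]
    rw [hcons]
    simp only [List.foldl_cons, hLj, hLj1]
    by_cases h : crvGet r field == cv
    · simp only [h, if_pos]
      have := ih (j+1) r acc cv (cnt+1) (by omega) (by simpa using hdropj)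
      push_cast at this ⊢
      rw [this]
      simp only [crvLoop, h, if_pos]
    · have hb : (crvGet r field == cv) = false := by simpa using h
      simp only [hb, Bool.false_eq_true, if_false]
      have := ih (j+1) r (acc ++ [crvEmit prev field cnt]) (crvGet r field) 1 (by omega) (by simpa using hdropj)
      push_cast at this ⊢
      rw [this]
      simp only [crvLoop, hb, Bool.false_eq_true, if_false, List.append_assoc, List.singleton_append]

-- crvLoop equals the run decomposition
lemma crv_loop_eq_runs (field : String) :
    ∀ (rest : List (List (String × Int))) (prev : List (String × Int)) (cnt : Int),
      crvLoop field prev (crvGet prev field) cnt rest =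
        crvEmit ((prev :: rest.takeWhile (fun y => crvGet y field == crvGet prev field)).getLastD []) field
            (cnt + ((rest.takeWhile (fun y => crvGet y field == crvGet prev field)).length : Int))
          :: crvRunsMap field (crvRuns field (rest.dropWhile (fun y => crvGet y field == crvGet prev field))) := by
  intro rest
  induction rest with
  | nil => intro prev cnt; simp [crvLoop, crvRuns, crvRunsMap]
  | cons r rs ih =>
    intro prev cnt
    by_cases h : crvGet r field == crvGet prev field
    · have heq : crvGet r field = crvGet prev field := by exact eq_of_beq h
      simp only [crvLoop, h, if_pos, List.takeWhile_cons, List.dropWhile_cons]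
      rw [← heq]
      have := ih r (cnt + 1)
      rw [this]
      have hc : (cnt + 1 + ((List.takeWhile (fun y => crvGet y field == crvGet r field) rs).length : Int)) = cnt + ((r :: List.takeWhile (fun y => crvGet y field == crvGet r field) rs).length : Int) := by push_cast [List.length_cons]; ring
      simp only [List.getLastD_eq_getLast?, List.getLast?_cons_cons, hc]
    · have hb : (crvGet r field == crvGet prev field) = false := by simpa using h
      simp only [crvLoop, hb, List.takeWhile_cons, List.dropWhile_cons, if_false, Bool.false_eq_true]
      rw [ih r 1]
      simp only [crvRuns, crvRunsMap, List.span_eq_takeWhile_dropWhile]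
      simp [Int.add_comm 1]

lemma crv_A_eq_runs (records : List (List (String × Int))) (field : String) :
    compress_repeated_values records field = crvRunsMap field (crvRuns field records) := by
  unfold compress_repeated_values
  cases records with
  | nil => simp [crvRuns, crvRunsMap]
  | cons h t =>
    have hne : (h :: t : List (List (String × Int))) ≠ [] := by simp
    simp only [if_neg hne]
    rw [crv_pyGetD_neg_one _ hne]
    have h0 : PySem.List.pyGetD (h :: t) 0 [] = h := by
      simp [PySem.List.pyGetD, PySem.List.pyGet?, PySem.List.pyIdx?]
    rw [h0]
    have hA := crv_fold_eq_loop field (h :: t) t 1 h [] (crvGet h field) 1 (by omega) (by simp)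
    push_cast at hA
    rw [hA]
    rw [crv_loop_eq_runs field t h 1]
    simp only [crvRuns, crvRunsMap, List.span_eq_takeWhile_dropWhile, List.map_cons, List.nil_append]
    congr 2
    push_cast [List.length_cons]; ring

-- ---------- B = runs ----------

def crvEnds (field : String) (L : List (List (String × Int))) : List Nat :=
  (List.range L.length).filter (crvPred field L)

def crvBody (field : String) (L : List (List (String × Int))) : List (List (String × Int)) :=
  (((-1 : Int) :: (crvEnds field L).map (fun (e : Nat) => (e : Int))).zip (crvEnds field L)).map
    (fun pe => crvEmit (L.getD pe.2 []) field ((pe.2 : Int) - pe.1))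

lemma crv_B_unfold (records : List (List (String × Int))) (field : String) :
    compress_repeated_values_alt records field = crvBody field records := rfl

-- keys of one run: a replicate of the run's key
lemma crv_keys_decomp (field : String) (r : List (String × Int)) (rs : List (List (String × Int))) :
    (r :: rs).map (fun y => crvGet y field)
      = List.replicate ((rs.takeWhile (fun y => crvGet y field == crvGet r field)).length + 1) (crvGet r field)
        ++ (rs.dropWhile (fun y => crvGet y field == crvGet r field)).map (fun y => crvGet y field) := by
  conv_lhs => rw [← List.takeWhile_append_dropWhile (p := fun y => crvGet y field == crvGet r field) (l := rs)]
  rw [← List.cons_append, List.map_append]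
  congr 1
  rw [List.eq_replicate_iff]
  constructor
  · simp
  · intro b hb
    simp only [List.map_cons, List.mem_cons, List.mem_map] at hb
    rcases hb with h | ⟨y, hy, rfl⟩
    · exact h
    · exact eq_of_beq (List.mem_takeWhile_imp (p := fun y => crvGet y field == crvGet r field) hy)

lemma crv_getD_shift (m : Nat) (k : Option Int) (ks : List (Option Int)) (j : Nat) :
    (List.replicate m k ++ ks).getD (m + j) none = ks.getD j none := by
  rw [List.getD_append_right _ _ _ _ (by simp)]
  simp

-- pointwise shape of the filter predicate on a run decomposition
lemma crv_pred_lt (field : String) (r : List (String × Int)) (rs : List (List (String × Int)))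
    (i : Nat) (hi : i < (rs.takeWhile (fun y => crvGet y field == crvGet r field)).length) :
    crvPred field (r :: rs) i = false := by
  have hlen : (rs.takeWhile (fun y => crvGet y field == crvGet r field)).length
      + (rs.dropWhile (fun y => crvGet y field == crvGet r field)).length = rs.length := by
    rw [← List.length_append, List.takeWhile_append_dropWhile]
  unfold crvPred
  rw [crv_keys_decomp field r rs]
  have h1 : (List.replicate ((rs.takeWhile (fun y => crvGet y field == crvGet r field)).length + 1) (crvGet r field)
      ++ (rs.dropWhile (fun y => crvGet y field == crvGet r field)).map (fun y => crvGet y field)).getD i none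
      = crvGet r field := by
    rw [List.getD_append _ _ _ _ (by simp; omega)]
    simp only [List.getD, List.getElem?_replicate]
    rw [if_pos (by omega)]; rfl
  have h2 : (List.replicate ((rs.takeWhile (fun y => crvGet y field == crvGet r field)).length + 1) (crvGet r field)
      ++ (rs.dropWhile (fun y => crvGet y field == crvGet r field)).map (fun y => crvGet y field)).getD (i+1) none
      = crvGet r field := by
    rw [List.getD_append _ _ _ _ (by simp; omega)]
    simp only [List.getD, List.getElem?_replicate]
    rw [if_pos (by omega)]; rfl
  simp only [h1, h2, beq_self_eq_true, Bool.not_true, Bool.or_false, List.length_cons,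
    Nat.add_sub_cancel]
  have hne : ¬ (i = rs.length) := by omega
  simp [hne]

lemma crv_pred_end (field : String) (r : List (String × Int)) (rs : List (List (String × Int))) :
    crvPred field (r :: rs) ((rs.takeWhile (fun y => crvGet y field == crvGet r field)).length) = true := by
  have hlen : (rs.takeWhile (fun y => crvGet y field == crvGet r field)).length
      + (rs.dropWhile (fun y => crvGet y field == crvGet r field)).length = rs.length := by
    rw [← List.length_append, List.takeWhile_append_dropWhile]
  unfold crvPred
  rw [crv_keys_decomp field r rs]
  set tl := (rs.takeWhile (fun y => crvGet y field == crvGet r field)).length with htl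
  cases hrest : rs.dropWhile (fun y => crvGet y field == crvGet r field) with
  | nil =>
    have h0 : (rs.dropWhile (fun y => crvGet y field == crvGet r field)).length = 0 := by
      rw [hrest]; rfl
    have : tl = rs.length + 1 - 1 := by omega
    simp [this]
  | cons h hs =>
    have hph : (crvGet h field == crvGet r field) = false := by
      have := List.dropWhile_get_zero_not (p := fun y => crvGet y field == crvGet r field) rs (by simp [hrest])
      simpa [hrest] using this
    have h1 : (List.replicate (tl + 1) (crvGet r field)
        ++ (h :: hs).map (fun y => crvGet y field)).getD tl none
        = crvGet r field := by
      rw [List.getD_append _ _ _ _ (by simp)]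
      simp [List.getD]
    have h2 : (List.replicate (tl + 1) (crvGet r field)
        ++ (h :: hs).map (fun y => crvGet y field)).getD (tl + 1) none
        = crvGet h field := by
      rw [List.getD_append_right _ _ _ _ (by simp)]
      simp
    have hne : ¬ (crvGet r field = crvGet h field) := by
      intro e; rw [e] at hph; simp at hph
    simp only [h1, h2, List.length_cons, Nat.add_sub_cancel]
    simp [hne]

lemma crv_pred_shift (field : String) (r : List (String × Int)) (rs : List (List (String × Int)))
    (j : Nat) (hj : j < (rs.dropWhile (fun y => crvGet y field == crvGet r field)).length) :
    crvPred field (r :: rs) (((rs.takeWhile (fun y => crvGet y field == crvGet r field)).length + 1) + j)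
      = crvPred field (rs.dropWhile (fun y => crvGet y field == crvGet r field)) j := by
  have hlen : (rs.takeWhile (fun y => crvGet y field == crvGet r field)).length
      + (rs.dropWhile (fun y => crvGet y field == crvGet r field)).length = rs.length := by
    rw [← List.length_append, List.takeWhile_append_dropWhile]
  unfold crvPred
  rw [crv_keys_decomp field r rs]
  set m := (rs.takeWhile (fun y => crvGet y field == crvGet r field)).length + 1 with hm
  set rest := rs.dropWhile (fun y => crvGet y field == crvGet r field) with hrest
  have h1 : (List.replicate m (crvGet r field) ++ rest.map (fun y => crvGet y field)).getD (m + j) none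
      = (rest.map (fun y => crvGet y field)).getD j none := crv_getD_shift m _ _ j
  have h2 : (List.replicate m (crvGet r field) ++ rest.map (fun y => crvGet y field)).getD (m + j + 1) none
      = (rest.map (fun y => crvGet y field)).getD (j + 1) none := by
    have : m + j + 1 = m + (j + 1) := by omega
    rw [this]; exact crv_getD_shift m _ _ (j + 1)
  simp only [h1, h2, List.length_cons]
  have hiff : (m + j = rs.length + 1 - 1) ↔ (j = rest.length - 1) := by omega
  congr 1
  exact decide_eq_decide.mpr hiff

-- ends of L decompose run by run
lemma crv_ends_decomp (field : String) (r : List (String × Int)) (rs : List (List (String × Int))) :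
    crvEnds field (r :: rs)
      = ((rs.takeWhile (fun y => crvGet y field == crvGet r field)).length)
        :: (crvEnds field (rs.dropWhile (fun y => crvGet y field == crvGet r field))).map
            (fun e => ((rs.takeWhile (fun y => crvGet y field == crvGet r field)).length + 1) + e) := by
  have hlen : (rs.takeWhile (fun y => crvGet y field == crvGet r field)).length
      + (rs.dropWhile (fun y => crvGet y field == crvGet r field)).length = rs.length := by
    rw [← List.length_append, List.takeWhile_append_dropWhile]
  set tl := (rs.takeWhile (fun y => crvGet y field == crvGet r field)).length with htl
  set rest := rs.dropWhile (fun y => crvGet y field == crvGet r field) with hrest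
  unfold crvEnds
  have hL : (r :: rs).length = (tl + 1) + rest.length := by
    simp only [List.length_cons]; omega
  rw [hL, List.range_add, List.filter_append]
  have hfirst : (List.range (tl + 1)).filter (crvPred field (r :: rs)) = [tl] := by
    rw [List.range_succ, List.filter_append]
    have hnil : (List.range tl).filter (crvPred field (r :: rs)) = [] := by
      rw [List.filter_eq_nil_iff]
      intro i hi
      simp only [List.mem_range] at hi
      simp [crv_pred_lt field r rs i hi]
    rw [hnil]
    have hpe : crvPred field (r :: rs) tl = true := by rw [htl]; exact crv_pred_end field r rs
    simp [hpe]
  have hsecond : ((List.range rest.length).map ((tl + 1) + ·)).filter (crvPred field (r :: rs))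
      = ((List.range rest.length).filter (crvPred field rest)).map ((tl + 1) + ·) := by
    rw [List.filter_map]
    congr 1
    apply List.filter_congr
    intro j hj
    simp only [List.mem_range] at hj
    exact crv_pred_shift field r rs j hj
  rw [hfirst, hsecond]
  rfl

lemma crv_zip_shift (m : Nat) :
    ∀ (es : List Nat) (a : Int),
      ((a + (m : Int)) :: (es.map (fun e => m + e)).map (fun (e : Nat) => (e : Int))).zip (es.map (fun e => m + e))
        = ((a :: es.map (fun (e : Nat) => (e : Int))).zip es).map (fun pe => (pe.1 + (m : Int), pe.2 + m)) := by
  intro es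
  induction es with
  | nil => intro a; simp
  | cons e es ih =>
    intro a
    simp only [List.map_cons, List.zip_cons_cons, List.map_cons]
    congr 1
    · simp [Nat.add_comm]
    · have he : ((m + e : Nat) : Int) = (e : Int) + (m : Int) := by push_cast; ring
      rw [he, ih (e : Int)]

lemma crv_getD_last (r : List (String × Int)) (t : List (List (String × Int))) :
    (r :: t).getD t.length [] = (r :: t).getLastD [] := by
  rw [List.getLastD_eq_getLast?, List.getLast?_eq_getElem?]
  simp [List.getD]

lemma crv_B_eq_runs (field : String) :
    ∀ (n : Nat) (L : List (List (String × Int))), L.length ≤ n →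
      crvBody field L = crvRunsMap field (crvRuns field L) := by
  intro n
  induction n with
  | zero =>
    intro L hL
    have hnil : L = [] := List.eq_nil_of_length_eq_zero (Nat.le_zero.mp hL)
    subst hnil
    simp [crvBody, crvEnds, crvRuns, crvRunsMap]
  | succ n ih =>
    intro L hL
    cases L with
    | nil => simp [crvBody, crvEnds, crvRuns, crvRunsMap]
    | cons r rs =>
      have hrestlen : (rs.dropWhile (fun y => crvGet y field == crvGet r field)).length ≤ n := by
        have := List.length_dropWhile_le (fun y => crvGet y field == crvGet r field) rs
        simp only [List.length_cons] at hL; omega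
      have hsplit : r :: rs
          = (r :: rs.takeWhile (fun y => crvGet y field == crvGet r field))
            ++ rs.dropWhile (fun y => crvGet y field == crvGet r field) := by
        simp [List.takeWhile_append_dropWhile]
      unfold crvBody
      rw [crv_ends_decomp field r rs]
      simp only [List.map_cons, List.zip_cons_cons, List.map_cons]
      have hcast : (((rs.takeWhile (fun y => crvGet y field == crvGet r field)).length : Nat) : Int)
          = -1 + ((((rs.takeWhile (fun y => crvGet y field == crvGet r field)).length + 1 : Nat)) : Int) := by
        push_cast; ring
      rw [hcast, crv_zip_shift ((rs.takeWhile (fun y => crvGet y field == crvGet r field)).length + 1)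
        (crvEnds field (rs.dropWhile (fun y => crvGet y field == crvGet r field))) (-1)]
      rw [List.map_map]
      have htail : (((-1 : Int) :: (crvEnds field (rs.dropWhile (fun y => crvGet y field == crvGet r field))).map (fun (e : Nat) => (e : Int))).zip
            (crvEnds field (rs.dropWhile (fun y => crvGet y field == crvGet r field)))).map
          ((fun pe : Int × Nat => crvEmit ((r :: rs).getD pe.2 []) field ((pe.2 : Int) - pe.1))
            ∘ (fun pe : Int × Nat => (pe.1 + (((rs.takeWhile (fun y => crvGet y field == crvGet r field)).length + 1 : Nat) : Int),
                pe.2 + ((rs.takeWhile (fun y => crvGet y field == crvGet r field)).length + 1))))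
          = crvBody field (rs.dropWhile (fun y => crvGet y field == crvGet r field)) := by
        unfold crvBody
        apply List.map_congr_left
        intro pe _
        simp only [Function.comp_apply]
        have hg : (r :: rs).getD (pe.2 + ((rs.takeWhile (fun y => crvGet y field == crvGet r field)).length + 1)) []
            = (rs.dropWhile (fun y => crvGet y field == crvGet r field)).getD pe.2 [] := by
          conv_lhs => rw [hsplit]
          rw [List.getD_append_right _ _ _ _ (by simp)]
          congr 1
          simp
        rw [hg]
        congr 1
        push_cast; ring
      rw [htail, ih _ hrestlen]
      have hhead : (r :: rs).getD ((rs.takeWhile (fun y => crvGet y field == crvGet r field)).length) []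
          = (r :: rs.takeWhile (fun y => crvGet y field == crvGet r field)).getLastD [] := by
        conv_lhs => rw [hsplit]
        rw [List.getD_append _ _ _ _ (by simp)]
        exact crv_getD_last r _
      rw [hhead]
      conv_rhs => rw [show crvRuns field (r :: rs)
          = (r :: rs.takeWhile (fun y => crvGet y field == crvGet r field))
            :: crvRuns field (rs.dropWhile (fun y => crvGet y field == crvGet r field)) from by
        simp [crvRuns, List.span_eq_takeWhile_dropWhile]]
      unfold crvRunsMap
      simp only [List.map_cons]
      congr 2
      simp only [List.length_cons]
      push_cast; ring

-- ===== VERDICT (by name: the statement is the Claim_ definition above) =====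
theorem compress_repeated_values_spec : Claim_equal_compress_repeated_values := by
  intro records field _
  unfold Spec_compress_repeated_values
  rw [crv_A_eq_runs, crv_B_unfold, crv_B_eq_runs field records.length records le_rfl]
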